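-- pv_equiv track=rewrite | github.com/GabrieleDecupis/Esercizi | Lezione5/Esercizio_riepilogativi.py | count_isolated
-- ===== SOURCE A (Python) =====
-- def count_isolated(number: list[int]) -> int:
--     counter = 0
--     if len(number) > 0:
--         for x in range(len(number)-1):
--             if number[x] == number[x + 1]:
--                 continue
--             if number[x] != number[x + 1] and number[x] != number[x - 1]:
--                 counter += 1
--         if number[len(number)-1] != number[len(number)-2]:
--             counter += 1
--
--     return counter
-- ===== SOURCE B (Python) =====
-- def count_isolated(number: list[int]) -> int:
--     # Count maximal runs of equal adjacent values whose length is exactly 1.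
--     if len(number) < 2:
--         return 0
--     count = 0
--     run = 1
--     for prev, cur in zip(number, number[1:]):
--         if cur == prev:
--             run += 1
--         else:
--             if run == 1:
--                 count += 1
--             run = 1
--     if run == 1:
--         count += 1
--     return count
-- ===== Notes on version B (the rewrite author's own statement) =====
-- stated objective: simpler
-- what changed: Replaces A's index-based loop (with its number[x-1] negative-index test and separate final check) by a single run-length scan over adjacent pairs that counts maximal runs of equal values having length exactly 1.
-- intended difference: On lists of length >= 2 whose first element differs from the second but equals the last, A's wrapped negative index (Python index -1, the last element) makes it skip the isolated first element and return one less than the isolated-element count, while B counts it as intended (e.g. [1,2,1]: A returns 2, B returns 3). — e.g. on count_isolated([1, 2, 1]): A returns 2, B returns 3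
import Mathlib
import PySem

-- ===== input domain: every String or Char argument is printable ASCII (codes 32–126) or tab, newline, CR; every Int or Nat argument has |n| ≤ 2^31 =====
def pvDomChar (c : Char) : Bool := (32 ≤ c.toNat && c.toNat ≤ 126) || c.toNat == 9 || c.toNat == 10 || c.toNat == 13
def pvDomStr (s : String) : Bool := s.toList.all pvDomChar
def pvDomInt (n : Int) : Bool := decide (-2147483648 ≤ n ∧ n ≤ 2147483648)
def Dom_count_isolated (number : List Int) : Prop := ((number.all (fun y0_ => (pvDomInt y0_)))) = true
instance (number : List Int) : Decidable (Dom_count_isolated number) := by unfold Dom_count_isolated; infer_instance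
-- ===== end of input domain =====

-- B replaces A's indexed neighbour tests by a single run-length scan counting runs of
-- length exactly 1 (objective: simpler); on lists whose first element differs from the
-- second but equals the last, A's negative-index wraparound misses the first element and
-- B intentionally counts it (see D_count_isolated below).

-- ===== PORT A =====
def count_isolated (number : List Int) : Int :=
  if number.length > 0 then
    let counter : Int := (PySem.List.pyRange 0 ((number.length : Int) - 1) 1).foldl
      (fun c x =>
        if PySem.List.pyGetD number x 0 = PySem.List.pyGetD number (x + 1) 0 then c
        else if PySem.List.pyGetD number x 0 ≠ PySem.List.pyGetD number (x + 1) 0 ∧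
                PySem.List.pyGetD number x 0 ≠ PySem.List.pyGetD number (x - 1) 0 then c + 1
        else c) 0
    if PySem.List.pyGetD number ((number.length : Int) - 1) 0 ≠
       PySem.List.pyGetD number ((number.length : Int) - 2) 0
    then counter + 1 else counter
  else 0

-- ===== PORT B =====
def count_isolated_alt (number : List Int) : Int :=
  if number.length < 2 then 0
  else
    let s := (number.zip (number.drop 1)).foldl
      (fun (s : Int × Int) (pc : Int × Int) =>
        if pc.2 = pc.1 then (s.1, s.2 + 1)
        else (s.1 + (if s.2 = 1 then 1 else 0), 1)) (0, 1)
    s.1 + (if s.2 = 1 then 1 else 0)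

-- ===== PRECONDITION & SPEC =====
-- On lists with length ≥ 2 whose first element differs from the second but equals the
-- last, A's wrapped negative index (Python index -1, the last element) suppresses the isolated first element and
-- A returns one less than the isolated-element count, while B returns the intended count.
def D_count_isolated (number : List Int) : Prop :=
  2 ≤ number.length ∧ number.head? ≠ number[1]? ∧ number.head? = number.getLast?
instance (number : List Int) : Decidable (D_count_isolated number) := by
  unfold D_count_isolated; infer_instance

def Spec_count_isolated (number : List Int) (out : Int) : Prop :=
  ¬ D_count_isolated number → out = count_isolated_alt number
instance (number : List Int) (out : Int) : Decidable (Spec_count_isolated number out) := by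
  unfold Spec_count_isolated; infer_instance

def pvDiffWitness_count_isolated : List Int := [1, 2, 1]
def pvDiffWitnessOut_count_isolated : Int × Int := (2, 3)

-- ===== CLAIM (what is proved, stated in full; the proofs are below) =====
def Claim_unchanged_count_isolated : Prop :=
  ∀ (number : List Int), Dom_count_isolated number →
    Spec_count_isolated number (count_isolated number)
def Claim_changed_count_isolated : Prop :=
  Dom_count_isolated (pvDiffWitness_count_isolated) ∧
  D_count_isolated (pvDiffWitness_count_isolated) ∧
  count_isolated (pvDiffWitness_count_isolated) = pvDiffWitnessOut_count_isolated.1 ∧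
  count_isolated_alt (pvDiffWitness_count_isolated) = pvDiffWitnessOut_count_isolated.2 ∧
  pvDiffWitnessOut_count_isolated.1 ≠ pvDiffWitnessOut_count_isolated.2
def Claim_exact_count_isolated : Prop :=
  ∀ (number : List Int), Dom_count_isolated number → D_count_isolated number →
    count_isolated number ≠ count_isolated_alt number

-- ===== LEMMAS AND PROOFS =====

-- Common core: number of isolated elements of `l` when the (virtual) predecessor of the
-- first element of `l` is `p`; the last element only has to differ from its predecessor.
def acore : Int → List Int → Int
  | _, [] => 0
  | p, [x] => if x ≠ p then 1 else 0
  | p, x :: y :: t => (if x ≠ y ∧ x ≠ p then 1 else 0) + acore x (y :: t)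

-- B side --------------------------------------------------------------------

def bcore : Bool → Int → List Int → Int
  | one, _, [] => if one then 1 else 0
  | one, x, b :: t => if b = x then bcore false b t else (if one then 1 else 0) + bcore true b t

theorem bfold (y : List Int) : ∀ (x c r : Int), 1 ≤ r →
    ((((x :: y).zip y).foldl
      (fun (s : Int × Int) (pc : Int × Int) =>
        if pc.2 = pc.1 then (s.1, s.2 + 1)
        else (s.1 + (if s.2 = 1 then 1 else 0), 1)) (c, r)).1 +
     (if (((x :: y).zip y).foldl
      (fun (s : Int × Int) (pc : Int × Int) =>
        if pc.2 = pc.1 then (s.1, s.2 + 1)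
        else (s.1 + (if s.2 = 1 then 1 else 0), 1)) (c, r)).2 = 1 then 1 else 0))
    = c + bcore (decide (r = 1)) x y := by
  induction y with
  | nil => intro x c r hr; simp [bcore]
  | cons b t ih =>
    intro x c r hr
    simp only [List.zip_cons_cons, List.foldl_cons]
    by_cases hbx : b = x
    · subst hbx
      rw [if_pos rfl]
      rw [ih b c (r + 1) (by omega)]
      have h1 : ¬ (r + 1 = 1) := by omega
      simp [bcore, h1]
    · rw [if_neg hbx]
      rw [ih b (c + (if r = 1 then 1 else 0)) 1 (by omega)]
      simp [bcore, hbx]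
      by_cases h1 : r = 1 <;> simp [h1] <;> try ring

theorem bcore_cons (one : Bool) (x b : Int) (t : List Int) :
    bcore one x (b :: t) = if b = x then bcore false b t
      else (if one then 1 else 0) + bcore true b t := rfl

theorem acore_cons2 (p x y : Int) (t : List Int) :
    acore p (x :: y :: t) = (if x ≠ y ∧ x ≠ p then 1 else 0) + acore x (y :: t) := rfl

theorem bcore_acore (y : List Int) : ∀ (x : Int),
    bcore false x y = acore x y ∧
    bcore true x y = (match y with | [] => 1 | b :: _ => if x = b then 0 else 1) + acore x y := by
  induction y with
  | nil => intro x; simp [bcore, acore]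
  | cons b t ih =>
    intro x
    have hf := fun z => (ih z).1
    have ht := fun z => (ih z).2
    rw [bcore_cons, bcore_cons]
    by_cases hbx : b = x
    · rw [if_pos hbx, if_pos hbx]
      cases t with
      | nil => simp [bcore, acore, hbx]
      | cons c t' =>
        rw [hf b]
        simp [acore_cons2, hbx]
    · rw [if_neg hbx, if_neg hbx, ht b]
      cases t with
      | nil => simp [acore, hbx, Ne.symm hbx]
      | cons c t' =>
        rw [acore_cons2]
        constructor
        · by_cases hbc : b = c <;> simp [hbc, hbx, Ne.symm hbx] <;> try (first | ring | omega)
        · by_cases hbc : b = c <;> simp [hbc, hbx, Ne.symm hbx] <;> try (first | ring | omega)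

theorem B_eq (a b : Int) (t : List Int) :
    count_isolated_alt (a :: b :: t) = (if a = b then 0 else 1) + acore a (b :: t) := by
  have h := bfold (b :: t) a 0 1 (by omega)
  have hb := (bcore_acore (b :: t) a).2
  simp only [count_isolated_alt, List.drop_one, List.tail_cons]
  rw [if_neg (by simp)]
  rw [h, show (decide ((1:Int) = 1)) = true from by decide, hb]
  simp

-- A side --------------------------------------------------------------------

-- A's loop-body indicator for the full list l at index x.
def indA (l : List Int) (x : Int) : Int :=
  if PySem.List.pyGetD l x 0 = PySem.List.pyGetD l (x + 1) 0 then 0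
  else if PySem.List.pyGetD l x 0 ≠ PySem.List.pyGetD l (x + 1) 0 ∧
          PySem.List.pyGetD l x 0 ≠ PySem.List.pyGetD l (x - 1) 0 then 1
  else 0

theorem stepA (l : List Int) (c x : Int) :
    (if PySem.List.pyGetD l x 0 = PySem.List.pyGetD l (x + 1) 0 then c
     else if PySem.List.pyGetD l x 0 ≠ PySem.List.pyGetD l (x + 1) 0 ∧
             PySem.List.pyGetD l x 0 ≠ PySem.List.pyGetD l (x - 1) 0 then c + 1
     else c) = c + indA l x := by
  unfold indA; split_ifs <;> omega

theorem getD_append_index (pre : List Int) (p : Int) (u : List Int) (k : Nat) :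
    PySem.List.pyGetD (pre ++ p :: u) ((pre.length : Int) + (k : Int)) 0 = (p :: u).getD k 0 := by
  have : (pre.length : Int) + (k : Int) = ((pre.length + k : Nat) : Int) := by push_cast; ring
  rw [this, PySem.List.pyGetD_natCast]
  simp [List.getD, List.getElem?_append_right (by omega : pre.length ≤ pre.length + k)]

-- the sum of A's indicators from index pre.length+1 upward, plus A's final test,
-- equals acore p u  (l = pre ++ p :: u, u nonempty)
theorem A_main (u : List Int) : ∀ (p : Int) (pre : List Int), u ≠ [] →
    ((PySem.List.pyRange ((pre.length : Int) + 1) (((pre ++ p :: u).length : Int) - 1) 1).map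
        (indA (pre ++ p :: u))).sum
      + (if PySem.List.pyGetD (pre ++ p :: u) (((pre ++ p :: u).length : Int) - 1) 0 ≠
            PySem.List.pyGetD (pre ++ p :: u) (((pre ++ p :: u).length : Int) - 2) 0
         then (1 : Int) else 0)
    = acore p u := by
  induction u with
  | nil => intro _ _ h; exact absurd rfl h
  | cons x v ih =>
    intro p pre _
    cases v with
    | nil =>
      have hlen : ((pre ++ p :: [x]).length : Int) = (pre.length : Int) + 2 := by
        simp <;> omega
      rw [hlen]
      rw [PySem.List.pyRange_one_eq_nil (by omega)]
      have h1 : (pre.length : Int) + 2 - 1 = (pre.length : Int) + (1 : Nat) := by push_cast; ring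
      have h2 : (pre.length : Int) + 2 - 2 = (pre.length : Int) + (0 : Nat) := by push_cast; ring
      rw [h1, h2, getD_append_index, getD_append_index]
      simp [acore, List.getD]

    | cons y w =>
      have hne : (y :: w : List Int) ≠ [] := by simp
      have ih' := ih x (pre ++ [p]) hne
      have hassoc : (pre ++ [p]) ++ x :: y :: w = pre ++ p :: x :: y :: w := by simp
      rw [hassoc] at ih'
      have hlen2 : ((pre ++ [p]).length : Int) = (pre.length : Int) + 1 := by simp
      rw [hlen2] at ih'
      set l := pre ++ p :: x :: y :: w with hl
      have hlenl : (l.length : Int) = (pre.length : Int) + 3 + (w.length : Int) := by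
        simp [hl]; push_cast; ring
      have hcons : PySem.List.pyRange ((pre.length : Int) + 1) ((l.length : Int) - 1) 1
          = ((pre.length : Int) + 1) :: PySem.List.pyRange ((pre.length : Int) + 1 + 1) ((l.length : Int) - 1) 1 :=
        PySem.List.pyRange_one_cons (by omega)
      rw [hcons, List.map_cons, List.sum_cons]
      have hx : indA l ((pre.length : Int) + 1) = (if x ≠ y ∧ x ≠ p then 1 else 0) := by
        unfold indA
        have e1 : PySem.List.pyGetD l ((pre.length : Int) + 1) 0 = x := by
          have := getD_append_index pre p (x :: y :: w) 1
          simpa [hl, List.getD] using this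
        have e2 : PySem.List.pyGetD l ((pre.length : Int) + 1 + 1) 0 = y := by
          have := getD_append_index pre p (x :: y :: w) 2
          have h2 : (pre.length : Int) + (2 : Nat) = (pre.length : Int) + 1 + 1 := by push_cast; ring
          rw [h2] at this
          simpa [hl, List.getD] using this
        have e3 : PySem.List.pyGetD l ((pre.length : Int) + 1 - 1) 0 = p := by
          have := getD_append_index pre p (x :: y :: w) 0
          have h0 : (pre.length : Int) + (0 : Nat) = (pre.length : Int) + 1 - 1 := by push_cast; ring
          rw [h0] at this
          simpa [hl, List.getD] using this
        rw [e1, e2, e3]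
        split_ifs <;> simp_all
      rw [hx]
      rw [show acore p (x :: y :: w) = (if x ≠ y ∧ x ≠ p then 1 else 0) + acore x (y :: w) from rfl]
      rw [← ih']
      ring

theorem A_eq (a b : Int) (t : List Int) :
    count_isolated (a :: b :: t) =
      (if a ≠ b ∧ a ≠ (a :: b :: t).getLast (by simp) then 1 else 0) + acore a (b :: t) := by
  have hfun : (fun (c x : Int) =>
      if PySem.List.pyGetD (a :: b :: t) x 0 = PySem.List.pyGetD (a :: b :: t) (x + 1) 0 then c
      else if PySem.List.pyGetD (a :: b :: t) x 0 ≠ PySem.List.pyGetD (a :: b :: t) (x + 1) 0 ∧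
              PySem.List.pyGetD (a :: b :: t) x 0 ≠ PySem.List.pyGetD (a :: b :: t) (x - 1) 0 then c + 1
      else c) = fun c x => c + indA (a :: b :: t) x := by
    funext c x; exact stepA (a :: b :: t) c x
  unfold count_isolated
  rw [if_pos (by simp)]
  simp only [hfun]
  rw [PySem.List.foldl_add]
  have hcons : PySem.List.pyRange 0 (((a :: b :: t).length : Int) - 1) 1
      = 0 :: PySem.List.pyRange 1 (((a :: b :: t).length : Int) - 1) 1 :=
    PySem.List.pyRange_one_cons (by simp)
  rw [hcons, List.map_cons, List.sum_cons]
  have hmain := A_main (b :: t) a [] (by simp)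
  simp only [List.nil_append, List.length_nil, Nat.cast_zero, zero_add] at hmain
  have h0 : indA (a :: b :: t) 0 = (if a ≠ b ∧ a ≠ (a :: b :: t).getLast (by simp) then 1 else 0) := by
    unfold indA
    have e1 : PySem.List.pyGetD (a :: b :: t) 0 0 = a := by simp [PySem.List.pyGetD_zero_cons]
    have e2 : PySem.List.pyGetD (a :: b :: t) (0 + 1) 0 = b := by
      rw [show ((0:Int) + 1) = ((1 : Nat) : Int) by norm_num, PySem.List.pyGetD_natCast]
      rfl
    have e3 : PySem.List.pyGetD (a :: b :: t) (0 - 1) 0 = (a :: b :: t).getLast (by simp) := by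
      have : (0 : Int) - 1 = -1 := by ring
      rw [this]
      exact PySem.List.pyGetD_neg_one (a :: b :: t) 0 (List.cons_ne_nil _ _)
    rw [e1, e2, e3]
    split_ifs <;> simp_all
  rw [h0, ← hmain]
  split_ifs <;> ring

-- assembly -------------------------------------------------------------------

theorem D_iff (a b : Int) (t : List Int) :
    D_count_isolated (a :: b :: t) ↔ a ≠ b ∧ a = (a :: b :: t).getLast (by simp) := by
  unfold D_count_isolated
  simp [List.getLast?_eq_getLast]

-- ===== VERDICT (by name: the statement is the Claim_ definition above) =====
theorem count_isolated_spec : Claim_unchanged_count_isolated := by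
  unfold Claim_unchanged_count_isolated
  intro number _ hD
  match number with
  | [] => rfl
  | [a] =>
    simp [count_isolated, count_isolated_alt, PySem.List.pyGetD_zero_cons,
      PySem.List.pyRange_one_eq_nil, PySem.List.pyGetD_neg_one]
  | a :: b :: t =>
    rw [A_eq, B_eq]
    rw [D_iff] at hD
    push_neg at hD
    by_cases hab : a = b
    · simp [hab]
    · have hlast := hD hab
      have hlast' : a ≠ (b :: t).getLast (by simp) := by simpa using hlast
      simp [hab, hlast']

theorem count_isolated_changed : Claim_changed_count_isolated := by
  unfold Claim_changed_count_isolated; decide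

theorem count_isolated_tight : Claim_exact_count_isolated := by
  unfold Claim_exact_count_isolated
  intro number _ hD
  match number with
  | [] => simp [D_count_isolated] at hD
  | [a] => simp [D_count_isolated] at hD
  | a :: b :: t =>
    rw [A_eq, B_eq]
    rw [D_iff] at hD
    obtain ⟨hab, hlast⟩ := hD
    have hlast' : a = (b :: t).getLast (by simp) := by simpa using hlast
    simp [hab, ← hlast']
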